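-- pv_equiv track=rewrite | github.com/sban2009/Code4Fun | codility-find-max-apples.py | find_max_apples
-- ===== SOURCE A (Python) =====
-- def find_max_apples(A, k, l):
--     if k + l > len(A):
--         return -1
--     sum_app = [0] * len(A)
--     sum_app[0] = A[0]
--     for i in range(1, len(A)):
--         sum_app[i] = sum_app[i - 1] + A[i]
--     max_app = -1
--     x, y = 0, 0
--     a = 0
--     while a + k - 1 < len(A):
--         if a > 0:
--             x = sum_app[a + k - 1] - sum_app[a - 1]
--         else:
--             x = sum_app[a + k - 1]
--         b = a + k
--         while b + l - 1 < len(A):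
--             if b > 0:
--                 y = sum_app[b + l - 1] - sum_app[b - 1]
--             else:
--                 y = sum_app[b + l - 1]
--             if x + y > max_app:
--                 max_app = x + y
--             b += 1
--         a += 1
--     return max_app
-- ===== SOURCE B (Python) =====
-- def find_max_apples(A, k, l):
--     n = len(A)
--     if k + l > n:
--         return -1
--     P = [0]
--     for v in A:
--         P.append(P[-1] + v)
--     best = -1
--     best_l = None
--     for a in range(n - k - l, -1, -1):
--         cur = P[a + k + l] - P[a + k]
--         best_l = cur if best_l is None else max(cur, best_l)
--         best = max(best, P[a + k] - P[a] + best_l)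
--     return best
-- ===== Notes on version B (the rewrite author's own statement) =====
-- stated objective: alternative
-- what changed: Replaced the nested scan over all (k-window, l-window) start pairs by prefix sums plus one descending pass over k-window starts maintaining the running maximum l-window sum to its right.
-- outside the precondition, e.g. on find_max_apples([1, 2, 3], 0, 2): A returns 11, B returns 5; on find_max_apples([], 0, 0): A raises IndexError, B returns 0
import Mathlib
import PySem

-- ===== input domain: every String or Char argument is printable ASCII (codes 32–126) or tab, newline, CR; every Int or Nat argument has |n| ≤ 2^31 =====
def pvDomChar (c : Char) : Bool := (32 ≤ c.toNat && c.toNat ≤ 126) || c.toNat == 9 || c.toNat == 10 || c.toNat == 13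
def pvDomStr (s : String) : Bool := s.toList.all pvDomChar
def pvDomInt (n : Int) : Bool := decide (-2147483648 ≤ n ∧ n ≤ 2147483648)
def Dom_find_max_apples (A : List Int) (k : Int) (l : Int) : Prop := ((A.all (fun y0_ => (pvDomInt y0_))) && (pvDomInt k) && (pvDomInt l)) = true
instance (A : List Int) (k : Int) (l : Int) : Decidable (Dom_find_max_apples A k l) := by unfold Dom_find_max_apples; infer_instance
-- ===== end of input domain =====

-- B replaces A's nested window scan by prefix sums and one descending pass keeping the
-- running maximum l-window sum to the right (objective: alternative algorithm).

-- ===== PORT A =====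
def find_max_apples (A : List Int) (k : Int) (l : Int) : Int :=
  let n : Int := (A.length : Int)
  if k + l > n then -1
  else
    -- sum_app[0] = A[0]; for i in range(1, n): sum_app[i] = sum_app[i-1] + A[i]
    let sumApp : List Int :=
      (PySem.List.pyRange 1 n 1).foldl
        (fun s i => s ++ [PySem.List.pyGetD s (i - 1) 0 + PySem.List.pyGetD A i 0])
        [PySem.List.pyGetD A 0 0]
    (PySem.List.pyRange 0 (n - k + 1) 1).foldl (fun maxApp a =>
      let x := if a > 0 then PySem.List.pyGetD sumApp (a + k - 1) 0 - PySem.List.pyGetD sumApp (a - 1) 0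
               else PySem.List.pyGetD sumApp (a + k - 1) 0
      (PySem.List.pyRange (a + k) (n - l + 1) 1).foldl (fun maxApp b =>
        let y := if b > 0 then PySem.List.pyGetD sumApp (b + l - 1) 0 - PySem.List.pyGetD sumApp (b - 1) 0
                 else PySem.List.pyGetD sumApp (b + l - 1) 0
        if x + y > maxApp then x + y else maxApp) maxApp) (-1)

-- ===== PORT B =====
def find_max_apples_alt (A : List Int) (k : Int) (l : Int) : Int :=
  let n : Int := (A.length : Int)
  if k + l > n then -1
  else
    -- P = [0]; for v in A: P.append(P[-1] + v)
    let P : List Int := A.foldl (fun P v => P ++ [PySem.List.pyGetD P (-1) 0 + v]) [0]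
    -- for a in range(n - k - l, -1, -1): running max of l-window sums, combine
    let r := (PySem.List.pyRange (n - k - l) (-1) (-1)).foldl
      (fun (st : Int × Option Int) a =>
        let cur := PySem.List.pyGetD P (a + k + l) 0 - PySem.List.pyGetD P (a + k) 0
        let bestL := match st.2 with
          | none => cur
          | some m => max cur m
        (max st.1 (PySem.List.pyGetD P (a + k) 0 - PySem.List.pyGetD P a 0 + bestL), some bestL))
      ((-1 : Int), (none : Option Int))
    r.1

-- ===== PRECONDITION & SPEC =====
-- Pre_ excludes non-positive window sizes k or l with k + l ≤ len(A): there A either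
-- raises IndexError (empty list, or an index below -len) or returns a value produced by
-- Python's negative-index wraparound (sum_app[a-2] etc.), an artefact of A's implementation.
def Pre_find_max_apples (A : List Int) (k : Int) (l : Int) : Prop :=
  (A.length : Int) < k + l ∨ (1 ≤ k ∧ 1 ≤ l)
instance (A : List Int) (k : Int) (l : Int) : Decidable (Pre_find_max_apples A k l) := by
  unfold Pre_find_max_apples; infer_instance

def pvWitness_find_max_apples : List Int × Int × Int := ([6, -1, 4, 6, 3, 2, 7, 4], 3, 2)

def Spec_find_max_apples (A : List Int) (k : Int) (l : Int) (out : Int) : Prop := out = find_max_apples_alt A k l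
instance (A : List Int) (k : Int) (l : Int) (out : Int) : Decidable (Spec_find_max_apples A k l out) := by unfold Spec_find_max_apples; infer_instance

-- ===== CLAIM (what is proved, stated in full; the proofs are below) =====
def Claim_equal_find_max_apples : Prop := ∀ (A : List Int) (k : Int) (l : Int), Dom_find_max_apples A k l → Pre_find_max_apples A k l → Spec_find_max_apples A k l (find_max_apples A k l)

-- ===== LEMMAS AND PROOFS =====

def preS (A : List Int) (i : Int) : Int := (A.take i.toNat).sum

def ymaxFrom (f : Int → Int) : Int → Nat → Int
  | j, 0 => f j
  | j, c + 1 => max (f j) (ymaxFrom f (j + 1) c)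

lemma pv_ite_max (m v : Int) : (if v > m then v else m) = max m v := by
  rw [max_def]; split_ifs <;> omega

lemma pv_getD_last (ys : List Int) (c d : Int) : PySem.List.pyGetD (ys ++ [c]) (-1) d = c := by
  simp [PySem.List.pyGetD, PySem.List.pyGet?, PySem.List.pyIdx?]

lemma pv_take_sum (A : List Int) (m : Nat) (h : m < A.length) :
    (A.take (m + 1)).sum = (A.take m).sum + A.getD m 0 := by
  rw [List.take_add_one, List.sum_append, List.getElem?_eq_getElem h]
  simp [List.getD_eq_getElem?_getD, List.getElem?_eq_getElem h]

lemma pv_sumApp (A : List Int) (hA : A ≠ []) : ∀ m : Nat, 1 ≤ m → m ≤ A.length →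
    (PySem.List.pyRange 1 (m : Int) 1).foldl
      (fun s i => s ++ [PySem.List.pyGetD s (i - 1) 0 + PySem.List.pyGetD A i 0])
      [PySem.List.pyGetD A 0 0]
    = (List.range m).map (fun i => (A.take (i + 1)).sum) := by
  intro m
  induction m with
  | zero => omega
  | succ m ih =>
    intro _ hm
    by_cases hm0 : m = 0
    · subst hm0
      have hlen : 0 < A.length := List.length_pos_iff.mpr hA
      rw [PySem.List.pyRange_one_eq_nil (by norm_num)]
      simp only [List.foldl_nil]
      rw [PySem.List.pyGetD_eq_getElem A 0 (by norm_num) (by exact_mod_cast hlen)]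
      simp [List.range_succ, List.take_add_one, List.getElem?_eq_getElem hlen]
    · have h1m : (1 : Int) ≤ (m : Int) := by omega
      have hmA : m ≤ A.length := by omega
      rw [show (((m + 1 : Nat)) : Int) = (m : Int) + 1 by push_cast; ring]
      rw [PySem.List.pyRange_one_succ_right h1m, List.foldl_append, ih (by omega) hmA]
      simp only [List.foldl_cons, List.foldl_nil]
      have hgm : PySem.List.pyGetD A (m : Int) 0 = A.getD m 0 := PySem.List.pyGetD_natCast A m 0
      have hgs : PySem.List.pyGetD ((List.range m).map (fun i => (A.take (i + 1)).sum)) ((m : Int) - 1) 0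
          = (A.take m).sum := by
        have hlt : m - 1 < m := by omega
        have hcast : ((m : Int) - 1) = ((m - 1 : Nat) : Int) := by omega
        rw [hcast, PySem.List.pyGetD_natCast, PySem.List.getD_map_range _ _ _ _ hlt,
          show m - 1 + 1 = m from by omega]
      rw [hgm, hgs, List.range_succ, List.map_append]
      simp [pv_take_sum A m (by omega)]

lemma pv_buildP : ∀ (xs pre : List Int) (c : Int),
    xs.foldl (fun P v => P ++ [PySem.List.pyGetD P (-1) 0 + v]) (pre ++ [c])
    = pre ++ (List.range (xs.length + 1)).map (fun i => c + (xs.take i).sum) := by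
  intro xs
  induction xs with
  | nil => intro pre c; simp
  | cons v t ih =>
    intro pre c
    simp only [List.foldl_cons, pv_getD_last]
    rw [ih (pre ++ [c]) (c + v), List.append_assoc]
    congr 1
    conv_rhs => rw [List.length_cons, List.range_succ_eq_map, List.map_cons, List.map_map]
    simp only [List.take_zero, List.sum_nil, add_zero, List.cons_append, List.nil_append]
    congr 1
    apply List.map_congr_left
    intro i _
    simp [List.take_succ_cons, add_assoc]

lemma pv_ymax_top (c : Nat) : ∀ (f : Int → Int) (j : Int),
    ymaxFrom f j (c + 1) = max (ymaxFrom f j c) (f (j + c + 1)) := by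
  induction c with
  | zero => intro f j; simp [ymaxFrom]
  | succ c ih =>
    intro f j
    have harg : j + 1 + (c : Int) + 1 = j + ((c + 1 : Nat) : Int) + 1 := by push_cast; ring
    rw [ymaxFrom, ih, harg, ymaxFrom, max_assoc]
lemma pv_ymax_shift (c : Nat) : ∀ (f : Int → Int) (k j : Int),
    ymaxFrom (fun t => f (t + k)) j c = ymaxFrom f (j + k) c := by
  induction c with
  | zero => intro f k j; simp [ymaxFrom]
  | succ c ih =>
    intro f k j
    have harg : j + 1 + k = j + k + 1 := by ring
    rw [ymaxFrom, ymaxFrom, ih, harg]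

lemma pv_ymax_add (c : Nat) : ∀ (f : Int → Int) (v j : Int),
    ymaxFrom (fun b => v + f b) j c = v + ymaxFrom f j c := by
  induction c with
  | zero => intro f v j; simp [ymaxFrom]
  | succ c ih =>
    intro f v j
    rw [ymaxFrom, ymaxFrom, ih, max_add_add_left]

lemma pv_foldl_max_range (c : Nat) : ∀ (f : Int → Int) (j m : Int),
    (PySem.List.pyRange j (j + (c : Int) + 1) 1).foldl (fun m b => max m (f b)) m
    = max m (ymaxFrom f j c) := by
  induction c with
  | zero =>
    intro f j m
    rw [show j + ((0 : Nat) : Int) + 1 = j + 1 by push_cast; ring, PySem.List.pyRange_one_singleton]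
    simp [ymaxFrom]
  | succ c ih =>
    intro f j m
    rw [PySem.List.pyRange_one_cons (by push_cast; omega), List.foldl_cons,
      show j + ((c + 1 : Nat) : Int) + 1 = (j + 1) + (c : Int) + 1 by push_cast; ring, ih, ymaxFrom, ← max_assoc]

lemma pv_foldl_swap (L : List Int) : ∀ (C : Int → Int) (m v : Int),
    L.foldl (fun m i => max m (C i)) (max m v) = max (L.foldl (fun m i => max m (C i)) m) v := by
  induction L with
  | nil => intro C m v; rfl
  | cons h t ih =>
    intro C m v
    simp only [List.foldl_cons]
    rw [max_right_comm, ih]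

lemma pv_foldl_id {α : Type} (L : List α) (body : Int → α → Int) (m : Int)
    (h : ∀ (m' : Int) (a : α), a ∈ L → body m' a = m') : L.foldl body m = m := by
  induction L generalizing m with
  | nil => rfl
  | cons x t ih =>
    rw [List.foldl_cons, h m x (by simp)]
    exact ih m (fun m' a ha => h m' a (by simp [ha]))

lemma pv_Bfold (f g : Int → Int) : ∀ (c : Nat) (m : Int) (bl : Option Int),
    ((PySem.List.pyRange ((c : Nat) : Int) (-1) (-1)).foldl
      (fun (st : Int × Option Int) a =>
        let bL := match st.2 with | none => f a | some B => max (f a) B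
        (max st.1 (g a + bL), some bL)) (m, bl)).1
    = (PySem.List.pyRange 0 ((c : Int) + 1) 1).foldl
        (fun m a => max m (g a + (match bl with
          | none => ymaxFrom f a (c - a.toNat)
          | some B => max (ymaxFrom f a (c - a.toNat)) B))) m := by
  intro c
  induction c with
  | zero =>
    intro m bl
    simp only [Nat.cast_zero]
    rw [PySem.List.pyRange_neg_one_cons (by norm_num), PySem.List.pyRange_neg_one_eq_nil (by norm_num),
      show (0 : Int) + 1 = 0 + 1 from rfl, PySem.List.pyRange_one_singleton]
    cases bl <;> simp [ymaxFrom]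
  | succ c ih =>
    intro m bl
    have hc1 : ((c + 1 : Nat) : Int) = (c : Int) + 1 := by push_cast; ring
    have hm1 : ((c : Int) + 1).toNat = c + 1 := by omega
    rw [hc1, PySem.List.pyRange_neg_one_cons (by omega), List.foldl_cons,
      PySem.List.pyRange_one_succ_right (by omega : (0 : Int) ≤ (c : Int) + 1), List.foldl_append]
    simp only [List.foldl_cons, List.foldl_nil, show (c : Int) + 1 - 1 = (c : Int) from by ring]
    cases bl with
    | none =>
      rw [ih]
      rw [PySem.List.foldl_congr_mem _ _
        (fun m a => max m (g a + max (ymaxFrom f a (c - a.toNat)) (f ((c : Int) + 1)))) m ?_]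
      · rw [pv_foldl_swap, hm1, Nat.sub_self]
        simp [ymaxFrom]
      · intro acc a ha
        obtain ⟨ha0, ha1⟩ := PySem.List.mem_pyRange_one.mp ha
        have hle : a.toNat ≤ c := by omega
        have hsub : c + 1 - a.toNat = (c - a.toNat) + 1 := by omega
        have harg : a + ((c - a.toNat : Nat) : Int) + 1 = (c : Int) + 1 := by omega
        rw [hsub, pv_ymax_top, harg]
    | some B =>
      rw [ih]
      rw [PySem.List.foldl_congr_mem _ _
        (fun m a => max m (g a + max (ymaxFrom f a (c - a.toNat)) (max (f ((c : Int) + 1)) B))) m ?_]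
      · rw [pv_foldl_swap, hm1, Nat.sub_self]
        simp [ymaxFrom]
      · intro acc a ha
        obtain ⟨ha0, ha1⟩ := PySem.List.mem_pyRange_one.mp ha
        have hle : a.toNat ≤ c := by omega
        have hsub : c + 1 - a.toNat = (c - a.toNat) + 1 := by omega
        have harg : a + ((c - a.toNat : Nat) : Int) + 1 = (c : Int) + 1 := by omega
        rw [hsub, pv_ymax_top, harg]
        simp [max_assoc]

lemma pv_preS_zero (A : List Int) : preS A 0 = 0 := rfl

lemma pv_getSA (A : List Int) (j : Int) (h0 : 0 ≤ j) (h1 : j < (A.length : Int)) :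
    PySem.List.pyGetD ((List.range A.length).map (fun i => (A.take (i + 1)).sum)) j 0
    = preS A (j + 1) := by
  rw [PySem.List.pyGetD_of_nonneg _ _ h0,
    PySem.List.getD_map_range _ _ _ _ (by omega), preS, show (j + 1).toNat = j.toNat + 1 from by omega]

lemma pv_getP (A : List Int) (j : Int) (h0 : 0 ≤ j) (h1 : j ≤ (A.length : Int)) :
    PySem.List.pyGetD ((List.range (A.length + 1)).map (fun i => (A.take i).sum)) j 0
    = preS A j := by
  rw [PySem.List.pyGetD_of_nonneg _ _ h0, PySem.List.getD_map_range _ _ _ _ (by omega), preS]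

def pvCanon (A : List Int) (k l : Int) : Int :=
  (PySem.List.pyRange 0 ((A.length : Int) - k - l + 1) 1).foldl
    (fun m a => max m ((preS A (a + k) - preS A a) +
      ymaxFrom (fun b => preS A (b + l) - preS A b) (a + k) (((A.length : Int) - k - l - a).toNat))) (-1)

lemma pv_A_norm (A : List Int) (k l : Int) (hk : 1 ≤ k) (hl : 1 ≤ l)
    (hn : k + l ≤ (A.length : Int)) : find_max_apples A k l = pvCanon A k l := by
  have hA : A ≠ [] := by
    intro h; subst h; simp at hn; omega
  simp only [find_max_apples]
  rw [if_neg (by omega)]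
  rw [pv_sumApp A hA A.length (by omega) le_rfl]
  rw [PySem.List.pyRange_one_append 0 ((A.length : Int) - k - l + 1) ((A.length : Int) - k + 1)
    (by omega) (by omega), List.foldl_append]
  rw [pv_foldl_id _ _ _ ?tail]
  case tail =>
    intro m' a ha
    obtain ⟨ha0, ha1⟩ := PySem.List.mem_pyRange_one.mp ha
    rw [PySem.List.pyRange_one_eq_nil (by omega)]
    rfl
  rw [pvCanon]
  rw [PySem.List.foldl_congr_mem _ _ _ _ ?head]
  case head =>
    intro acc a ha
    obtain ⟨ha0, ha1⟩ := PySem.List.mem_pyRange_one.mp ha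
    rw [PySem.List.foldl_congr_mem _ _
      (fun m b => max m ((preS A (a + k) - preS A a) + (preS A (b + l) - preS A b))) acc ?_]
    · have hend : (A.length : Int) - l + 1 = (a + k) + (((A.length : Int) - k - l - a).toNat : Int) + 1 := by
        omega
      rw [hend, pv_foldl_max_range,
        pv_ymax_add _ (fun b => preS A (b + l) - preS A b) (preS A (a + k) - preS A a) (a + k)]
    · intro acc' b hb
      obtain ⟨hb0, hb1⟩ := PySem.List.mem_pyRange_one.mp hb
      rw [if_pos (by omega : b > 0)]
      rw [pv_getSA A (b + l - 1) (by omega) (by omega), pv_getSA A (b - 1) (by omega) (by omega),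
        show b + l - 1 + 1 = b + l from by ring, show b - 1 + 1 = b from by ring]
      by_cases hagt : a > 0
      · rw [if_pos hagt, pv_getSA A (a + k - 1) (by omega) (by omega),
          pv_getSA A (a - 1) (by omega) (by omega),
          show a + k - 1 + 1 = a + k from by ring, show a - 1 + 1 = a from by ring, pv_ite_max]
      · have ha0' : a = 0 := by omega
        rw [if_neg hagt, pv_getSA A (a + k - 1) (by omega) (by omega),
          show a + k - 1 + 1 = a + k from by ring, pv_ite_max, ha0', pv_preS_zero, sub_zero]

lemma pv_B_norm (A : List Int) (k l : Int) (hk : 1 ≤ k) (hl : 1 ≤ l)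
    (hn : k + l ≤ (A.length : Int)) : find_max_apples_alt A k l = pvCanon A k l := by
  simp only [find_max_apples_alt]
  rw [if_neg (by omega)]
  have hP : A.foldl (fun P v => P ++ [PySem.List.pyGetD P (-1) 0 + v]) [0]
      = (List.range (A.length + 1)).map (fun i => ((A.take i).sum : Int)) := by
    simpa using pv_buildP A [] 0
  rw [hP]
  rw [PySem.List.foldl_congr_mem _ _
    (fun (st : Int × Option Int) a =>
      let bL := match st.2 with
        | none => (fun t => preS A (t + k + l) - preS A (t + k)) a
        | some B => max ((fun t => preS A (t + k + l) - preS A (t + k)) a) B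
      (max st.1 ((fun t => preS A (t + k) - preS A t) a + bL), some bL)) _ ?bb]
  case bb =>
    intro st a ha
    obtain ⟨ha0, ha1⟩ := PySem.List.mem_pyRange_neg_one.mp ha
    simp only []
    rw [pv_getP A (a + k + l) (by omega) (by omega), pv_getP A (a + k) (by omega) (by omega),
      pv_getP A a (by omega) (by omega)]
  have hN0 : (A.length : Int) - k - l = ((((A.length : Int) - k - l).toNat : Nat) : Int) := by omega
  rw [hN0, pv_Bfold]
  rw [pvCanon]
  dsimp only
  rw [← hN0]
  apply PySem.List.foldl_congr_mem
  intro acc a ha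
  obtain ⟨ha0, ha1⟩ := PySem.List.mem_pyRange_one.mp ha
  have hcnt : ((A.length : Int) - k - l).toNat - a.toNat
      = (((A.length : Int) - k - l) - a).toNat := by omega
  rw [hcnt]
  congr 2
  exact pv_ymax_shift _ (fun b => preS A (b + l) - preS A b) k a

-- ===== VERDICT (by name: the statement is the Claim_ definition above) =====
theorem find_max_apples_spec : Claim_equal_find_max_apples := by
  intro A k l _ hpre
  unfold Spec_find_max_apples
  by_cases hbig : (A.length : Int) < k + l
  · simp only [find_max_apples, find_max_apples_alt]
    rw [if_pos (by omega), if_pos (by omega)]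
  · obtain ⟨hk, hl⟩ : 1 ≤ k ∧ 1 ≤ l := by
      rcases hpre with h | h
      · omega
      · exact h
    rw [pv_A_norm A k l hk hl (by omega), pv_B_norm A k l hk hl (by omega)]
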